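-- pv_equiv track=rewrite | github.com/tomloraso/grokcivitas3 | apps/backend/src/civitas/infrastructure/pipelines/dfe_workforce.py | _select_workforce_school_level_file
-- ===== SOURCE A (Python) =====
-- from collections.abc import Callable, Iterator, Mapping, Sequence
--
-- def _select_workforce_school_level_file(
--     download_files: Sequence[object],
-- ) -> dict[str, object] | None:
--     preferred: list[dict[str, object]] = []
--     fallback: list[dict[str, object]] = []
--     for item in download_files:
--         if not isinstance(item, dict):
--             continue
--         name = item.get("name")
--         if not isinstance(name, str):
--             continue
--         normalized = name.casefold()
--         if "school level" not in normalized: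
--             continue
--         fallback.append(item)
--         if any(token in normalized for token in ("workforce", "teacher", "staff")):
--             preferred.append(item)
--     selected = preferred or fallback
--     if not selected:
--         return None
--     selected.sort(key=lambda item: str(item.get("id") or ""))
--     return selected[0]
-- ===== SOURCE B (Python) =====
-- def _select_workforce_school_level_file(download_files):
--     best_preferred = None  # (key, item) with smallest key among preferred, first on ties
--     best_fallback = None
--     for item in download_files:
--         if not isinstance(item, dict):
--             continue
--         name = item.get("name")
--         if not isinstance(name, str):
--             continue
--         normalized = name.casefold()
--         if "school level" not in normalized:
--             continue
--         key = str(item.get("id") or "")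
--         if best_fallback is None or key < best_fallback[0]:
--             best_fallback = (key, item)
--         if ("workforce" in normalized or "teacher" in normalized or "staff" in normalized) and (
--             best_preferred is None or key < best_preferred[0]
--         ):
--             best_preferred = (key, item)
--     if best_preferred is not None:
--         return best_preferred[1]
--     if best_fallback is not None:
--         return best_fallback[1]
--     return None
-- ===== Notes on version B (the rewrite author's own statement) =====
-- stated objective: alternative
-- what changed: Replaces the two accumulated lists plus stable sort and [0] with a single pass that keeps running strict-< minima (best_preferred, best_fallback) keyed by str(item.get('id') or ''), so no intermediate lists are built and no sort is performed.
import Mathlib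
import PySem

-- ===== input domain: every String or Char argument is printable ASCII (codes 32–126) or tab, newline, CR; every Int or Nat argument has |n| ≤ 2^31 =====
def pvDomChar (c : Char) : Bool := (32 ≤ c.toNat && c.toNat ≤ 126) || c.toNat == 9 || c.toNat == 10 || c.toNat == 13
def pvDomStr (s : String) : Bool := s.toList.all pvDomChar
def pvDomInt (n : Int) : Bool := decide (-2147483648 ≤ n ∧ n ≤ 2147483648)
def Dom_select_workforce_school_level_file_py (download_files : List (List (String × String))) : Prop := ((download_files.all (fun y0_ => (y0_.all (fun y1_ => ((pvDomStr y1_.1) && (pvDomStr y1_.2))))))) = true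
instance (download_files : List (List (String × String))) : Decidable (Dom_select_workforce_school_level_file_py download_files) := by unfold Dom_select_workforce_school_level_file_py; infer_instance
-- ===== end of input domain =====

-- B replaces the two accumulated lists + stable sort + [0] by a single pass keeping running
-- strict-< minima for the preferred and fallback candidates (objective: alternative algorithm).

-- ===== PORT A =====
-- shared by both ports: the sort key str(item.get("id") or "") ('' when missing or empty)
def pvKeyOf (item : List (String × String)) : String :=
  ((PySem.Dict.mk item).get? "id").getD ""

def select_workforce_school_level_file_py (download_files : List (List (String × String))) : Option (List (String × String)) :=
  let st := download_files.foldl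
    (fun (acc : List (List (String × String)) × List (List (String × String))) item =>
      match (PySem.Dict.mk item).get? "name" with
      | none => acc
      | some name =>
        let normalized := PySem.Str.lower name
        if PySem.Str.isIn "school level" normalized then
          let fb := acc.2 ++ [item]
          if PySem.Str.isIn "workforce" normalized || PySem.Str.isIn "teacher" normalized ||
              PySem.Str.isIn "staff" normalized then
            (acc.1 ++ [item], fb)
          else
            (acc.1, fb)
        else acc)
    ([], [])
  let selected := if st.1.isEmpty then st.2 else st.1
  if selected.isEmpty then none
  else PySem.List.pyGet? (PySem.List.sorted selected pvKeyOf false) 0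

-- ===== PORT B =====
def pvUpdMin (best : Option (String × List (String × String))) (k : String)
    (item : List (String × String)) : Option (String × List (String × String)) :=
  match best with
  | none => some (k, item)
  | some b => if k < b.1 then some (k, item) else some b

def select_workforce_school_level_file_py_alt (download_files : List (List (String × String))) : Option (List (String × String)) :=
  let st := download_files.foldl
    (fun (acc : Option (String × List (String × String)) × Option (String × List (String × String))) item =>
      match (PySem.Dict.mk item).get? "name" with
      | none => acc
      | some name =>
        let normalized := PySem.Str.lower name
        if PySem.Str.isIn "school level" normalized then
          let key := pvKeyOf item
          let fb := pvUpdMin acc.2 key item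
          let pref :=
            if PySem.Str.isIn "workforce" normalized || PySem.Str.isIn "teacher" normalized ||
                PySem.Str.isIn "staff" normalized then
              pvUpdMin acc.1 key item
            else acc.1
          (pref, fb)
        else acc)
    (none, none)
  match st.1 with
  | some b => some b.2
  | none =>
    match st.2 with
    | some b => some b.2
    | none => none

-- ===== PRECONDITION & SPEC =====
def Spec_select_workforce_school_level_file_py (download_files : List (List (String × String))) (out : Option (List (String × String))) : Prop := out = select_workforce_school_level_file_py_alt download_files
instance (download_files : List (List (String × String))) (out : Option (List (String × String))) : Decidable (Spec_select_workforce_school_level_file_py download_files out) := by unfold Spec_select_workforce_school_level_file_py; infer_instance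

-- ===== CLAIM (what is proved, stated in full; the proofs are below) =====
def Claim_equal_select_workforce_school_level_file_py : Prop := ∀ (download_files : List (List (String × String))), Dom_select_workforce_school_level_file_py download_files → Spec_select_workforce_school_level_file_py download_files (select_workforce_school_level_file_py download_files)

-- ===== LEMMAS AND PROOFS =====

-- the two filter predicates: "school-level item" and "school-level item with a workforce token"
def pvFall (item : List (String × String)) : Bool :=
  match (PySem.Dict.mk item).get? "name" with
  | none => false
  | some name => PySem.Str.isIn "school level" (PySem.Str.lower name)

def pvTok (item : List (String × String)) : Bool :=
  match (PySem.Dict.mk item).get? "name" with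
  | none => false
  | some name =>
    PySem.Str.isIn "workforce" (PySem.Str.lower name) ||
    PySem.Str.isIn "teacher" (PySem.Str.lower name) ||
    PySem.Str.isIn "staff" (PySem.Str.lower name)

-- A's loop builds exactly the two filtered lists
theorem foldA_eq (dfs : List (List (String × String))) :
    dfs.foldl
      (fun (acc : List (List (String × String)) × List (List (String × String))) item =>
        match (PySem.Dict.mk item).get? "name" with
        | none => acc
        | some name =>
          let normalized := PySem.Str.lower name
          if PySem.Str.isIn "school level" normalized then
            let fb := acc.2 ++ [item]
            if PySem.Str.isIn "workforce" normalized || PySem.Str.isIn "teacher" normalized ||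
                PySem.Str.isIn "staff" normalized then
              (acc.1 ++ [item], fb)
            else
              (acc.1, fb)
          else acc)
      ([], [])
    = (dfs.filter (fun x => pvFall x && pvTok x), dfs.filter pvFall) := by
  have hstep : ∀ (acc : List (List (String × String)) × List (List (String × String))) item,
      (match (PySem.Dict.mk item).get? "name" with
      | none => acc
      | some name =>
        let normalized := PySem.Str.lower name
        if PySem.Str.isIn "school level" normalized then
          let fb := acc.2 ++ [item]
          if PySem.Str.isIn "workforce" normalized || PySem.Str.isIn "teacher" normalized ||
              PySem.Str.isIn "staff" normalized then
            (acc.1 ++ [item], fb)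
          else
            (acc.1, fb)
        else acc)
      = ((if pvFall item && pvTok item then acc.1 ++ [item] else acc.1),
         (if pvFall item then acc.2 ++ [item] else acc.2)) := by
    intro acc item
    unfold pvFall pvTok
    generalize (PySem.Dict.mk item).get? "name" = v
    cases v with
    | none => simp
    | some name => simp only; split_ifs <;> simp_all
  calc dfs.foldl _ (([], []) : List (List (String × String)) × List (List (String × String)))
      = dfs.foldl (fun acc item =>
          ((if pvFall item && pvTok item then acc.1 ++ [item] else acc.1),
           (if pvFall item then acc.2 ++ [item] else acc.2))) ([], []) := by
        exact PySem.List.foldl_congr_mem _ _ _ _ (fun acc x _ => hstep acc x)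
    _ = _ := by
        rw [PySem.List.foldl_prod_mk
          (f := fun acc item => if pvFall item && pvTok item then acc ++ [item] else acc)
          (g := fun acc item => if pvFall item then acc ++ [item] else acc)]
        rw [PySem.List.foldl_append_if_eq_filter, PySem.List.foldl_append_if_eq_filter]
        simp

-- B's loop is the running minimum over the same two filtered lists
theorem foldB_eq (dfs : List (List (String × String))) :
    dfs.foldl
      (fun (acc : Option (String × List (String × String)) × Option (String × List (String × String))) item =>
        match (PySem.Dict.mk item).get? "name" with
        | none => acc
        | some name =>
          let normalized := PySem.Str.lower name
          if PySem.Str.isIn "school level" normalized then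
            let key := pvKeyOf item
            let fb := pvUpdMin acc.2 key item
            let pref :=
              if PySem.Str.isIn "workforce" normalized || PySem.Str.isIn "teacher" normalized ||
                  PySem.Str.isIn "staff" normalized then
                pvUpdMin acc.1 key item
              else acc.1
            (pref, fb)
          else acc)
      (none, none)
    = ((dfs.filter (fun x => pvFall x && pvTok x)).foldl (fun b x => pvUpdMin b (pvKeyOf x) x) none,
       (dfs.filter pvFall).foldl (fun b x => pvUpdMin b (pvKeyOf x) x) none) := by
  have hstep : ∀ (acc : Option (String × List (String × String)) × Option (String × List (String × String))) item,
      (match (PySem.Dict.mk item).get? "name" with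
      | none => acc
      | some name =>
        let normalized := PySem.Str.lower name
        if PySem.Str.isIn "school level" normalized then
          let key := pvKeyOf item
          let fb := pvUpdMin acc.2 key item
          let pref :=
            if PySem.Str.isIn "workforce" normalized || PySem.Str.isIn "teacher" normalized ||
                PySem.Str.isIn "staff" normalized then
              pvUpdMin acc.1 key item
            else acc.1
          (pref, fb)
        else acc)
      = ((if pvFall item && pvTok item then pvUpdMin acc.1 (pvKeyOf item) item else acc.1),
         (if pvFall item then pvUpdMin acc.2 (pvKeyOf item) item else acc.2)) := by
    intro acc item
    unfold pvFall pvTok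
    generalize (PySem.Dict.mk item).get? "name" = v
    cases v with
    | none => simp
    | some name => simp only; split_ifs <;> simp_all
  calc dfs.foldl _ ((none, none) : Option (String × List (String × String)) × Option (String × List (String × String)))
      = dfs.foldl (fun acc item =>
          ((if pvFall item && pvTok item then pvUpdMin acc.1 (pvKeyOf item) item else acc.1),
           (if pvFall item then pvUpdMin acc.2 (pvKeyOf item) item else acc.2))) (none, none) := by
        exact PySem.List.foldl_congr_mem _ _ _ _ (fun acc x _ => hstep acc x)
    _ = _ := by
        rw [PySem.List.foldl_prod_mk
          (f := fun acc item => if pvFall item && pvTok item then pvUpdMin acc (pvKeyOf item) item else acc)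
          (g := fun acc item => if pvFall item then pvUpdMin acc (pvKeyOf item) item else acc)]
        rw [PySem.List.foldl_if_eq_foldl_filter, PySem.List.foldl_if_eq_foldl_filter]

-- the head of stable insertion sort IS the running strict-< minimum
theorem head_insertBy (x : List (String × String)) (acc : List (List (String × String))) :
    (PySem.List.insertBy (fun a b => decide (pvKeyOf a < pvKeyOf b)) x acc).head?
      = (pvUpdMin (acc.head?.map (fun h => (pvKeyOf h, h))) (pvKeyOf x) x).map (·.2) := by
  cases acc with
  | nil => simp [PySem.List.insertBy, pvUpdMin]
  | cons h t =>
    simp only [PySem.List.insertBy, pvUpdMin, Option.map_some, List.head?_cons]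
    by_cases hlt : pvKeyOf x < pvKeyOf h <;> simp [hlt]

theorem foldl_insertBy_head (l : List (List (String × String))) :
    ∀ (acc : List (List (String × String))),
    (l.foldl (fun a x => PySem.List.insertBy (fun a b => decide (pvKeyOf a < pvKeyOf b)) x a) acc).head?.map
        (fun h => (pvKeyOf h, h))
      = l.foldl (fun b x => pvUpdMin b (pvKeyOf x) x) (acc.head?.map (fun h => (pvKeyOf h, h))) := by
  induction l with
  | nil => intro acc; simp
  | cons x xs ih =>
    intro acc
    simp only [List.foldl_cons]
    rw [ih]
    congr 1
    rw [head_insertBy]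
    cases acc with
    | nil => simp [pvUpdMin]
    | cons h t =>
      simp only [List.head?_cons, Option.map_some, pvUpdMin]
      by_cases hlt : pvKeyOf x < pvKeyOf h <;> simp [hlt]

theorem sorted_head_eq_min (l : List (List (String × String))) :
    (PySem.List.sorted l pvKeyOf false).head?
      = (l.foldl (fun b x => pvUpdMin b (pvKeyOf x) x) none).map (·.2) := by
  have h := foldl_insertBy_head l []
  simp only [List.head?_nil, Option.map_none] at h
  rw [PySem.List.sorted_eq_foldl_insertBy, ← h]
  generalize (l.foldl (fun a x => PySem.List.insertBy (fun a b => decide (pvKeyOf a < pvKeyOf b)) x a) []).head? = o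
  cases o <;> rfl

theorem foldl_min_eq_none_iff (l : List (List (String × String))) :
    l.foldl (fun b x => pvUpdMin b (pvKeyOf x) x) none = none ↔ l = [] := by
  constructor
  · intro h
    have hs := sorted_head_eq_min l
    rw [h] at hs
    cases hsor : PySem.List.sorted l pvKeyOf false with
    | nil => exact (PySem.List.sorted_eq_nil_iff l pvKeyOf false).mp hsor
    | cons a t => rw [hsor] at hs; simp at hs
  · intro h; subst h; rfl

-- ===== VERDICT (by name: the statement is the Claim_ definition above) =====
theorem select_workforce_school_level_file_py_spec : Claim_equal_select_workforce_school_level_file_py := by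
  intro dfs _
  unfold Spec_select_workforce_school_level_file_py
  unfold select_workforce_school_level_file_py select_workforce_school_level_file_py_alt
  rw [foldA_eq, foldB_eq]
  simp only
  set P := dfs.filter (fun x => pvFall x && pvTok x) with hP
  set F := dfs.filter pvFall with hF
  by_cases hp : P = []
  · by_cases hf : F = []
    · simp [hp, hf]
    · have hmin := sorted_head_eq_min F
      cases hfold : F.foldl (fun b x => pvUpdMin b (pvKeyOf x) x) none with
      | none => exact absurd ((foldl_min_eq_none_iff F).mp hfold) hf
      | some b =>
        simp only [hp, List.isEmpty_nil, if_true]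
        rw [if_neg (by simp [hf]), PySem.List.pyGet?_zero, ← List.head?_eq_getElem?, hmin, hfold]
        rfl
  · have hmin := sorted_head_eq_min P
    cases hfold : P.foldl (fun b x => pvUpdMin b (pvKeyOf x) x) none with
    | none => exact absurd ((foldl_min_eq_none_iff P).mp hfold) hp
    | some b =>
      rw [if_neg (by simp [hp]), if_neg (by simp [hp]), PySem.List.pyGet?_zero,
        ← List.head?_eq_getElem?, hmin, hfold]
      rfl
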